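-- pv_equiv track=rewrite | github.com/soyukke/lean-unsolved | scripts/erdos77_paley.py | build_paley_graph
-- ===== SOURCE A (Python) =====
-- import math
--
-- def is_prime(n):
--     if n < 2:
--         return False
--     if n < 4:
--         return True
--     if n % 2 == 0 or n % 3 == 0:
--         return False
--     i = 5
--     while i * i <= n:
--         if n % i != 0 and n % (i + 2) != 0:
--             i += 6
--             continue
--         return False
--     return True
--
-- def is_prime_power(n):
--     """n が素数冪 p^k かどうか判定し、(p, k) を返す"""
--     if n < 2:
--         return None
--     for p in range(2, int(n**0.5) + 2):
--         if not is_prime(p):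
--             continue
--         k = 0
--         val = 1
--         while val < n:
--             val *= p
--             k += 1
--         if val == n:
--             return (p, k)
--     if is_prime(n):
--         return (n, 1)
--     return None
--
-- def quadratic_residues(q):
--     """F_q の二次剰余の集合（q が素数の場合）"""
--     qr = set()
--     for x in range(1, q):
--         qr.add(pow(x, 2, q))
--     return qr
--
-- def quadratic_residues_prime_power(p, k):
--     """
--     F_{p^k} の二次剰余。
--     p^k ≡ 1 mod 4 のとき Paley graph が定義可能。
--
--     素数の場合は単純。素数冪 (k>1) の場合は多項式環で構成するが、
--     ここでは簡略化して p が奇素数の場合のみ扱う。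
--     """
--     q = p ** k
--     if k == 1:
--         return quadratic_residues(q), q
--
--     # p^k で k > 1 の場合、F_{p^k} の乗法群は巡回群。
--     # 原始根を見つけて二次剰余を計算。
--     # 簡略化: q = p^k が素数冪の場合、
--     # Z/qZ の乗法群で二次剰余を計算（F_q とは異なるが近似）
--
--     # 実際の F_{p^k} は Z/pZ[x]/(f(x)) で f は p 上の k 次既約多項式
--     # ここでは素数の場合のみ正確に扱う
--     if k > 1:
--         # Z/qZ の二次剰余で代用（正確ではないが傾向は同じ）
--         qr = set()
--         for x in range(1, q):
--             if math.gcd(x, q) == 1: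
--                 qr.add(pow(x, 2, q))
--         return qr, q
--
--     return quadratic_residues(q), q
--
-- def build_paley_graph(q):
--     """
--     Paley graph G(q) を構成。
--     q ≡ 1 mod 4 の素数（冪）。
--     頂点: {0, 1, ..., q-1}
--     辺: (x, y) ⟺ x-y が F_q の二次剰余
--     """
--     pp = is_prime_power(q)
--     if pp is None:
--         return None
--     p, k = pp
--
--     qr, _ = quadratic_residues_prime_power(p, k)
--
--     adj = {i: set() for i in range(q)}
--     edge_count = 0
--     for i in range(q):
--         for j in range(i + 1, q):
--             diff = (j - i) % q
--             if diff in qr: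
--                 adj[i].add(j)
--                 adj[j].add(i)
--                 edge_count += 1
--
--     return adj, edge_count, qr
-- ===== SOURCE B (Python) =====
-- import math
--
-- def is_prime(n):
--     if n < 2:
--         return False
--     if n < 4:
--         return True
--     if n % 2 == 0 or n % 3 == 0:
--         return False
--     i = 5
--     while i * i <= n:
--         if n % i != 0 and n % (i + 2) != 0:
--             i += 6
--             continue
--         return False
--     return True
--
-- def is_prime_power(n):
--     if n < 2:
--         return None
--     for p in range(2, int(n**0.5) + 2):
--         if not is_prime(p):
--             continue
--         k = 0
--         val = 1
--         while val < n:
--             val *= p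
--             k += 1
--         if val == n:
--             return (p, k)
--     if is_prime(n):
--         return (n, 1)
--     return None
--
-- def quadratic_residues(q):
--     qr = set()
--     for x in range(1, q):
--         qr.add(pow(x, 2, q))
--     return qr
--
-- def quadratic_residues_prime_power(p, k):
--     q = p ** k
--     if k == 1:
--         return quadratic_residues(q), q
--     if k > 1:
--         qr = set()
--         for x in range(1, q):
--             if math.gcd(x, q) == 1:
--                 qr.add(pow(x, 2, q))
--         return qr, q
--     return quadratic_residues(q), q
--
-- def build_paley_graph(q):
--     # Generate the graph from the residue DISTANCES instead of scanning all
--     # vertex pairs: vertex v's neighbours are exactly v-d and v+d for the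
--     # positive residue distances d, and each edge {i, i+d} is counted once
--     # at its lower endpoint, so no pairwise membership test is needed.
--     pp = is_prime_power(q)
--     if pp is None:
--         return None
--     p, k = pp
--     qr, _ = quadratic_residues_prime_power(p, k)
--     ds = sorted(d for d in qr if d > 0)  # positive residue distances, ascending
--     adj = {}
--     edge_count = 0
--     for v in range(q):
--         lower = [v - d for d in reversed(ds) if d <= v]
--         upper = [v + d for d in ds if v + d < q]
--         adj[v] = set(lower + upper)
--         edge_count += len(upper)
--     return adj, edge_count, qr
-- ===== Notes on version B (the rewrite author's own statement) =====
-- stated objective: alternative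
-- what changed: A scans all vertex pairs i<j and tests (j-i) mod q for membership in the residue set; B never enumerates pairs: it sorts the positive residue distances once and generates each vertex's neighbour set directly as {v-d, v+d : d a residue distance}, counting each edge once at its lower endpoint, so the inner membership scan disappears.
import Mathlib
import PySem

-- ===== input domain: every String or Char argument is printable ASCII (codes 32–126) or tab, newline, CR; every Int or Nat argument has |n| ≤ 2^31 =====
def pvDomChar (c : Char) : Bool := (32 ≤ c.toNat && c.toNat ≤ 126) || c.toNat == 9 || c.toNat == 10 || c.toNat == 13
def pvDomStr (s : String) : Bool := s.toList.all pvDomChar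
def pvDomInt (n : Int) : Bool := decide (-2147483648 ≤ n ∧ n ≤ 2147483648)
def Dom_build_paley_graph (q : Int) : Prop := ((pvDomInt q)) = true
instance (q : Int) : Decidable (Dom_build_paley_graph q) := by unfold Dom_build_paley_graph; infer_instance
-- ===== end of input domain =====

-- B generates the graph from the sorted positive residue distances (each vertex's
-- neighbours are v±d, each edge counted once at its lower endpoint) instead of A's
-- scan over all vertex pairs with a membership test (objective: alternative).

-- ===== PORT A =====
-- Helpers is_prime / is_prime_power / quadratic_residues / quadratic_residues_prime_power are
-- IDENTICAL in Source A and Source B (B keeps them unchanged), so both ports share these transliterations.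

-- while i * i <= n: … i += 6.  Ported with a Nat fuel that strictly exceeds the number of
-- iterations (i advances by 6 while i*i ≤ n forces i ≤ n), so the loop is exactly Python's while.
def pvIsPrimeLoop (n : Int) : Nat → Int → Bool
  | 0, _ => true
  | fuel + 1, i =>
    if i * i ≤ n then
      if PySem.Int.mod n i != 0 && PySem.Int.mod n (i + 2) != 0 then pvIsPrimeLoop n fuel (i + 6)
      else false
    else true

def pv_is_prime (n : Int) : Bool :=
  if n < 2 then false
  else if n < 4 then true
  else if PySem.Int.mod n 2 == 0 || PySem.Int.mod n 3 == 0 then false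
  else pvIsPrimeLoop n (n.toNat + 1) 5

-- while val < n: val *= p; k += 1.  Fuel n.toNat + 1 strictly exceeds the number of
-- iterations at every call site (val starts at 1 and at least doubles, p being a prime ≥ 2),
-- so the loop is exactly Python's while there.
def pvPowLoop (p n : Int) : Nat → Int → Int → Int × Int
  | 0, val, k => (val, k)
  | fuel + 1, val, k =>
    if val < n then pvPowLoop p n fuel (val * p) (k + 1) else (val, k)

-- the 'for p in range(…): … return (p, k)' loop of is_prime_power
def pvIsPrimePowerGo (n : Int) : List Int → Option (Int × Int)
  | [] => if pv_is_prime n then some (n, 1) else none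
  | p :: ps =>
    if pv_is_prime p then
      let vk := pvPowLoop p n (n.toNat + 1) 1 0
      if vk.1 == n then some (p, vk.2) else pvIsPrimePowerGo n ps
    else pvIsPrimePowerGo n ps

-- integer square root (largest k with k*k ≤ n), by counting: kernel-reducible
def pvISqrt (n : Int) : Int :=
  (((PySem.List.pyRange 0 (n + 2) 1).filter (fun k => k * k ≤ n)).length : Int) - 1

-- int(n**0.5) ported as the integer square root: exact for 0 ≤ n ≤ 2^31 (CPython's float sqrt
-- is correctly rounded; below 2^31 the rounding can never reach the next integer, checked by brute force).
def pv_is_prime_power (n : Int) : Option (Int × Int) :=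
  if n < 2 then none
  else pvIsPrimePowerGo n (PySem.List.pyRange 2 (pvISqrt n + 2) 1)

def pv_quadratic_residues (q : Int) : PySem.Set Int :=
  (PySem.List.pyRange 1 q 1).foldl
    (fun s x => PySem.Set.add s (PySem.Int.powMod x 2 q)) PySem.Set.empty

-- p ** k ported as p ^ k.toNat: is_prime_power only ever yields k ≥ 1.
def pv_qr_prime_power (p k : Int) : PySem.Set Int × Int :=
  let q := p ^ k.toNat
  if k == 1 then (pv_quadratic_residues q, q)
  else if 1 < k then
    ((PySem.List.pyRange 1 q 1).foldl
      (fun s x => if Int.gcd x q == 1 then PySem.Set.add s (PySem.Int.powMod x 2 q) else s)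
      PySem.Set.empty, q)
  else (pv_quadratic_residues q, q)

-- body of A's inner 'for j in range(i + 1, q)' loop; adj[i].add(j) / adj[j].add(i) are
-- Dict.modify at keys that are always present (0 ≤ i < j < q), so the default is never used
def pvStepA (q : Int) (qr : PySem.Set Int) (i : Int)
    (st : PySem.Dict Int (PySem.Set Int) × Int) (j : Int) :
    PySem.Dict Int (PySem.Set Int) × Int :=
  let diff := PySem.Int.mod (j - i) q
  if PySem.Set.contains qr diff then
    ((st.1.modify i PySem.Set.empty (fun s => PySem.Set.add s j)).modify j PySem.Set.empty
        (fun s => PySem.Set.add s i), st.2 + 1)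
  else st

def build_paley_graph (q : Int) : Option ((List (Int × List Int)) × Int × List Int) :=
  match pv_is_prime_power q with
  | none => none
  | some pk =>
    let qr := (pv_qr_prime_power pk.1 pk.2).1
    let adj0 : PySem.Dict Int (PySem.Set Int) :=
      (PySem.List.pyRange 0 q 1).foldl (fun d i => d.insert i PySem.Set.empty) PySem.Dict.empty
    let st :=
      (PySem.List.pyRange 0 q 1).foldl
        (fun st i => (PySem.List.pyRange (i + 1) q 1).foldl (pvStepA q qr i) st)
        (adj0, (0 : Int))
    some (st.1.items, st.2, qr)

-- ===== PORT B =====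
-- ds = sorted(d for d in qr if d > 0)
def pvPosDs (qr : PySem.Set Int) : List Int :=
  PySem.List.sorted (qr.filter (fun d => decide (0 < d))) (fun x => x)

-- lower = [v - d for d in reversed(ds) if d <= v]
def pvLower (ds : List Int) (v : Int) : List Int :=
  (ds.reverse.filter (fun d => decide (d ≤ v))).map (fun d => v - d)

-- upper = [v + d for d in ds if v + d < q]
def pvUpper (ds : List Int) (q v : Int) : List Int :=
  (ds.filter (fun d => decide (v + d < q))).map (fun d => v + d)

def build_paley_graph_alt (q : Int) : Option ((List (Int × List Int)) × Int × List Int) :=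
  match pv_is_prime_power q with
  | none => none
  | some pk =>
    let qr := (pv_qr_prime_power pk.1 pk.2).1
    let ds := pvPosDs qr
    -- for v in range(q): adj[v] = set(lower + upper); edge_count += len(upper)
    let st :=
      (PySem.List.pyRange 0 q 1).foldl
        (fun st v =>
          (st.1.insert v (PySem.Set.ofList (pvLower ds v ++ pvUpper ds q v)),
           st.2 + ((pvUpper ds q v).length : Int)))
        (PySem.Dict.empty, (0 : Int))
    some (st.1.items, st.2, qr)

-- ===== PRECONDITION & SPEC =====
def Spec_build_paley_graph (q : Int) (out : Option ((List (Int × List Int)) × Int × List Int)) : Prop := out = build_paley_graph_alt q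
instance (q : Int) (out : Option ((List (Int × List Int)) × Int × List Int)) : Decidable (Spec_build_paley_graph q out) := by unfold Spec_build_paley_graph; infer_instance

-- ===== CLAIM (what is proved, stated in full; the proofs are below) =====
def Claim_equal_build_paley_graph : Prop := ∀ (q : Int), Dom_build_paley_graph q → Spec_build_paley_graph q (build_paley_graph q)

-- ===== LEMMAS AND PROOFS =====

-- the full neighbour list of v (all u in [0,q) at residue distance from v, increasing)
def pvFull (q : Int) (qr : PySem.Set Int) (v : Int) : List Int :=
  (PySem.List.pyRange 0 q 1).filter (fun u => u != v && PySem.Set.contains qr |u - v|)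

-- partial neighbour list of v after A has processed outer rows i < s (only rows below s reach v)
def pvBel (qr : PySem.Set Int) (s v : Int) : List Int :=
  (PySem.List.pyRange 0 s 1).filter (fun u => PySem.Set.contains qr (v - u))

def pvCnt (qr : PySem.Set Int) (i q : Int) : Int :=
  ((PySem.List.pyRange (i + 1) q 1).countP (fun j => PySem.Set.contains qr (j - i)) : Int)

def pvTot (qr : PySem.Set Int) (s q : Int) : Int :=
  ((PySem.List.pyRange s q 1).map (fun i => pvCnt qr i q)).sum

lemma pvMod_small {x q : Int} (h0 : 0 ≤ x) (h1 : x < q) : PySem.Int.mod x q = x := by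
  rw [PySem.Int.mod_eq_emod_of_pos (by omega)]
  exact Int.emod_eq_of_lt h0 h1

lemma pvBel_succ (qr : PySem.Set Int) (s v : Int) (hs : 0 ≤ s) :
    pvBel qr (s + 1) v
      = pvBel qr s v ++ (if PySem.Set.contains qr (v - s) then [s] else []) := by
  unfold pvBel
  rw [PySem.List.pyRange_one_succ_right hs, List.filter_append]
  congr 1
  by_cases h : (v - s) ∈ qr <;> simp [h]

lemma pvFull_eq (q : Int) (qr : PySem.Set Int) (v : Int) (h0 : 0 ≤ v) (h1 : v < q) :
    pvFull q qr v
      = pvBel qr v v ++ (PySem.List.pyRange (v + 1) q 1).filter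
          (fun j => PySem.Set.contains qr (j - v)) := by
  unfold pvFull pvBel
  rw [PySem.List.pyRange_one_append 0 v q h0 (by omega),
      PySem.List.pyRange_one_append v (v + 1) q (by omega) (by omega),
      List.filter_append, List.filter_append, PySem.List.pyRange_one_singleton]
  congr 1
  · apply List.filter_congr
    intro u hu
    rw [PySem.List.mem_pyRange_one] at hu
    have h1 : |u - v| = v - u := by rw [abs_sub_comm]; exact abs_of_nonneg (by omega)
    have h2 : (u != v) = true := by simp only [bne_iff_ne, ne_eq]; omega
    rw [h1, h2, Bool.true_and]
  · have hmid : List.filter (fun u => u != v && PySem.Set.contains qr |u - v|) [v] = [] := by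
      simp
    rw [hmid, List.nil_append]
    apply List.filter_congr
    intro j hj
    rw [PySem.List.mem_pyRange_one] at hj
    have h1 : |j - v| = j - v := abs_of_nonneg (by omega)
    have h2 : (j != v) = true := by simp only [bne_iff_ne, ne_eq]; omega
    rw [h1, h2, Bool.true_and]

-- A's inner loop, characterised
lemma pvInner (q i : Int) (qr : PySem.Set Int) :
    ∀ (t : Int) (d : PySem.Dict Int (PySem.Set Int)) (c : Int),
    0 ≤ i → i < t →
    (∀ x ∈ d.getD i PySem.Set.empty, x < t) →
    (∀ v : Int, t ≤ v → i ∉ d.getD v PySem.Set.empty) →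
    d.contains i = true →
    (∀ v : Int, t ≤ v → v < q → d.contains v = true) →
    (((PySem.List.pyRange t q 1).foldl (pvStepA q qr i) (d, c)).1.keys = d.keys ∧
     ((PySem.List.pyRange t q 1).foldl (pvStepA q qr i) (d, c)).2
       = c + ((PySem.List.pyRange t q 1).countP (fun j => PySem.Set.contains qr (j - i)) : Int) ∧
     ∀ v : Int,
       ((PySem.List.pyRange t q 1).foldl (pvStepA q qr i) (d, c)).1.getD v PySem.Set.empty =
       if v = i then
         d.getD i PySem.Set.empty
           ++ (PySem.List.pyRange t q 1).filter (fun j => PySem.Set.contains qr (j - i))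
       else if t ≤ v ∧ v < q ∧ PySem.Set.contains qr (v - i) = true then
         d.getD v PySem.Set.empty ++ [i]
       else d.getD v PySem.Set.empty) := by
  intro t d c
  generalize hfuel : (q - t).toNat = n
  induction n generalizing t d c with
  | zero =>
    intro hi hit hdi hdv hki hkv
    have hqt : q ≤ t := by omega
    rw [PySem.List.pyRange_one_eq_nil hqt]
    refine ⟨rfl, by simp, ?_⟩
    intro v
    by_cases hv : v = i
    · simp [hv]
    · have hcond : ¬ (t ≤ v ∧ v < q ∧ PySem.Set.contains qr (v - i) = true) := by
        rintro ⟨h1, h2, _⟩; omega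
      rw [if_neg hv, if_neg hcond]
      rfl
  | succ n ih =>
    intro hi hit hdi hdv hki hkv
    have htq : t < q := by omega
    have hne : i ≠ t := by omega
    rw [PySem.List.pyRange_one_cons htq, List.foldl_cons, List.countP_cons, List.filter_cons]
    have hmod : PySem.Int.mod (t - i) q = t - i := pvMod_small (by omega) (by omega)
    by_cases hc : PySem.Set.contains qr (t - i)
    · -- the pair (i, t) is an edge
      have hc' : (t - i) ∈ qr := (PySem.Set.contains_iff _ _).1 hc
      have hstep : pvStepA q qr i (d, c) t
          = ((d.modify i PySem.Set.empty (fun s => PySem.Set.add s t)).modify t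
              PySem.Set.empty (fun s => PySem.Set.add s i), c + 1) := by
        simp [pvStepA, hmod, hc']
      rw [hstep]
      set d2 := (d.modify i PySem.Set.empty (fun s => PySem.Set.add s t)).modify t
          PySem.Set.empty (fun s => PySem.Set.add s i) with hd2
      have hgetD2 : ∀ v : Int, d2.getD v PySem.Set.empty =
          if v = t then d.getD t PySem.Set.empty ++ [i]
          else if v = i then d.getD i PySem.Set.empty ++ [t]
          else d.getD v PySem.Set.empty := by
        intro v
        rw [hd2]
        simp only [PySem.Dict.getD_modify, if_neg (show ¬ (t = i) by omega)]
        by_cases hvt : v = t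
        · simp only [if_pos hvt]
          exact PySem.Set.add_of_not_mem (hdv t (le_refl t))
        · simp only [if_neg hvt]
          by_cases hvi : v = i
          · simp only [if_pos hvi]
            exact PySem.Set.add_of_not_mem
              (fun hm => absurd (hdi t hm) (lt_irrefl t))
          · simp only [if_neg hvi]
      have hkeys2 : d2.keys = d.keys := by
        rw [hd2, PySem.Dict.keys_modify, PySem.Dict.keys_insert_of_contains]
        · rw [PySem.Dict.keys_modify, PySem.Dict.keys_insert_of_contains _ _ hki]
        · rw [PySem.Dict.contains_modify]
          simp [hkv t (le_refl t) htq]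
      have ihres := ih (t + 1) d2 (c + 1) (by omega) hi (by omega)
        (by intro x hx
            rw [hgetD2 i, if_neg hne, if_pos rfl] at hx
            rcases List.mem_append.1 hx with h | h
            · exact lt_trans (hdi x h) (by omega)
            · simp at h; omega)
        (by intro v hv
            rw [hgetD2 v, if_neg (show ¬ v = t by omega), if_neg (show ¬ v = i by omega)]
            exact hdv v (by omega))
        (by rw [hd2]; simp [PySem.Dict.contains_modify, hki])
        (by intro v hv1 hv2
            rw [hd2]
            simp [PySem.Dict.contains_modify, hkv v (by omega) hv2])
      obtain ⟨hK, hC, hG⟩ := ihres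
      refine ⟨by rw [hK, hkeys2], ?_, ?_⟩
      · rw [hC, if_pos hc]
        push_cast
        ring
      · intro v
        rw [hG v]
        by_cases hvi : v = i
        · subst hvi
          rw [if_pos rfl, if_pos rfl, hgetD2 v, if_neg hne, if_pos rfl, if_pos hc,
              List.append_assoc, List.singleton_append]
        · rw [if_neg hvi, if_neg hvi]
          by_cases hvt : v = t
          · subst hvt
            rw [if_neg (show ¬ (v + 1 ≤ v ∧ v < q ∧ PySem.Set.contains qr (v - i) = true) by
                  rintro ⟨h1, _, _⟩; omega),
                if_pos ⟨le_refl v, htq, hc⟩, hgetD2 v, if_pos rfl]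
          · by_cases hcond : t + 1 ≤ v ∧ v < q ∧ PySem.Set.contains qr (v - i) = true
            · rw [if_pos hcond,
                  if_pos (show t ≤ v ∧ v < q ∧ PySem.Set.contains qr (v - i) = true from
                    ⟨by omega, hcond.2.1, hcond.2.2⟩),
                  hgetD2 v, if_neg hvt, if_neg hvi]
            · rw [if_neg hcond,
                  if_neg (show ¬ (t ≤ v ∧ v < q ∧ PySem.Set.contains qr (v - i) = true) by
                    rintro ⟨h1, h2, h3⟩
                    exact hcond ⟨by omega, h2, h3⟩),
                  hgetD2 v, if_neg hvt, if_neg hvi]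
    · -- (i, t) is not an edge: state unchanged
      have hc' : (t - i) ∉ qr := fun hm => hc ((PySem.Set.contains_iff _ _).2 hm)
      have hstep : pvStepA q qr i (d, c) t = (d, c) := by
        simp [pvStepA, hmod, hc']
      rw [hstep]
      have ihres := ih (t + 1) d c (by omega) hi (by omega)
        (fun x hx => lt_trans (hdi x hx) (by omega))
        (fun v hv => hdv v (by omega))
        hki
        (fun v hv1 hv2 => hkv v (by omega) hv2)
      obtain ⟨hK, hC, hG⟩ := ihres
      refine ⟨hK, ?_, ?_⟩
      · rw [hC, if_neg hc]
        push_cast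
        ring
      · intro v
        rw [hG v]
        by_cases hvi : v = i
        · subst hvi
          rw [if_pos rfl, if_pos rfl, if_neg hc]
        · rw [if_neg hvi, if_neg hvi]
          by_cases hcond : t + 1 ≤ v ∧ v < q ∧ PySem.Set.contains qr (v - i) = true
          · rw [if_pos hcond,
                if_pos (show t ≤ v ∧ v < q ∧ PySem.Set.contains qr (v - i) = true from
                  ⟨by omega, hcond.2.1, hcond.2.2⟩)]
          · rw [if_neg hcond,
                if_neg (show ¬ (t ≤ v ∧ v < q ∧ PySem.Set.contains qr (v - i) = true) by
                  rintro ⟨h1, h2, h3⟩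
                  rcases eq_or_lt_of_le h1 with he | hl
                  · rw [← he] at h3
                    exact hc h3
                  · exact hcond ⟨by omega, h2, h3⟩)]

-- A's outer loop, characterised
lemma pvOuter (q : Int) (qr : PySem.Set Int) :
    ∀ (s : Int) (d : PySem.Dict Int (PySem.Set Int)) (c : Int),
    0 ≤ s →
    d.keys = PySem.List.pyRange 0 q 1 →
    (∀ v : Int, d.getD v PySem.Set.empty =
       if 0 ≤ v ∧ v < q then (if v < s then pvFull q qr v else pvBel qr s v)
       else PySem.Set.empty) →
    (((PySem.List.pyRange s q 1).foldl
        (fun st i => (PySem.List.pyRange (i + 1) q 1).foldl (pvStepA q qr i) st)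
        (d, c)).1.keys = PySem.List.pyRange 0 q 1 ∧
     ((PySem.List.pyRange s q 1).foldl
        (fun st i => (PySem.List.pyRange (i + 1) q 1).foldl (pvStepA q qr i) st)
        (d, c)).2 = c + pvTot qr s q ∧
     ∀ v : Int,
       ((PySem.List.pyRange s q 1).foldl
          (fun st i => (PySem.List.pyRange (i + 1) q 1).foldl (pvStepA q qr i) st)
          (d, c)).1.getD v PySem.Set.empty =
       if 0 ≤ v ∧ v < q then pvFull q qr v else PySem.Set.empty) := by
  intro s d c
  generalize hfuel : (q - s).toNat = n
  induction n generalizing s d c with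
  | zero =>
    intro hs hkeys hinv
    have hqs : q ≤ s := by omega
    rw [PySem.List.pyRange_one_eq_nil hqs]
    refine ⟨hkeys, by simp [pvTot, PySem.List.pyRange_one_eq_nil hqs], ?_⟩
    intro v
    show d.getD v PySem.Set.empty = _
    rw [hinv v]
    by_cases hv : 0 ≤ v ∧ v < q
    · rw [if_pos hv, if_pos hv, if_pos (by omega : v < s)]
    · rw [if_neg hv, if_neg hv]
  | succ n ih =>
    intro hs hkeys hinv
    have hsq : s < q := by omega
    rw [PySem.List.pyRange_one_cons hsq, List.foldl_cons]
    have hsR : s ∈ PySem.List.pyRange 0 q 1 := PySem.List.mem_pyRange_one.2 ⟨hs, hsq⟩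
    have hinner := pvInner q s qr (s + 1) d c hs (by omega)
      (by intro x hx
          rw [hinv s, if_pos ⟨hs, hsq⟩, if_neg (lt_irrefl s)] at hx
          unfold pvBel at hx
          have := PySem.List.mem_pyRange_one.1 (List.mem_of_mem_filter hx)
          omega)
      (by intro v hv hmem
          by_cases h0 : 0 ≤ v ∧ v < q
          · rw [hinv v, if_pos h0, if_neg (by omega : ¬ v < s)] at hmem
            unfold pvBel at hmem
            have := PySem.List.mem_pyRange_one.1 (List.mem_of_mem_filter hmem)
            omega
          · rw [hinv v, if_neg h0] at hmem
            simp [PySem.Set.empty] at hmem)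
      (by rw [PySem.Dict.contains_iff_mem_keys, hkeys]; exact hsR)
      (by intro v h1 h2
          rw [PySem.Dict.contains_iff_mem_keys, hkeys]
          exact PySem.List.mem_pyRange_one.2 ⟨by omega, h2⟩)
    obtain ⟨hK, hC, hG⟩ := hinner
    set st1 := (PySem.List.pyRange (s + 1) q 1).foldl (pvStepA q qr s) (d, c) with hst1
    have ihres := ih (s + 1) st1.1 st1.2 (by omega) (by omega)
      (by rw [hK, hkeys])
      (by intro v
          rw [hG v]
          by_cases hvs : v = s
          · subst hvs
            rw [if_pos rfl, hinv v, if_pos ⟨hs, hsq⟩, if_neg (lt_irrefl v),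
                if_pos ⟨hs, hsq⟩, if_pos (by omega : v < v + 1), ← pvFull_eq q qr v hs hsq]
          · rw [if_neg hvs]
            by_cases h0 : 0 ≤ v ∧ v < q
            · by_cases hlt : v < s
              · rw [if_neg (by rintro ⟨h1, _, _⟩; omega :
                      ¬ (s + 1 ≤ v ∧ v < q ∧ PySem.Set.contains qr (v - s) = true)),
                    hinv v, if_pos h0, if_pos hlt, if_pos h0, if_pos (by omega : v < s + 1)]
              · have hgt : s < v := by omega
                rw [hinv v, if_pos h0, if_neg (by omega : ¬ v < s), if_pos h0,
                    if_neg (by omega : ¬ v < s + 1), pvBel_succ qr s v hs]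
                by_cases hcv : PySem.Set.contains qr (v - s) = true
                · rw [if_pos ⟨by omega, h0.2, hcv⟩, if_pos hcv]
                · rw [if_neg (by rintro ⟨_, _, h3⟩; exact hcv h3 :
                        ¬ (s + 1 ≤ v ∧ v < q ∧ PySem.Set.contains qr (v - s) = true)),
                      if_neg hcv, List.append_nil]
            · rw [if_neg (by rintro ⟨h1, h2, _⟩; exact h0 ⟨by omega, h2⟩ :
                    ¬ (s + 1 ≤ v ∧ v < q ∧ PySem.Set.contains qr (v - s) = true)),
                  hinv v, if_neg h0, if_neg h0])
    obtain ⟨hK2, hC2, hG2⟩ := ihres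
    have heta : (st1.1, st1.2) = st1 := rfl
    rw [heta] at hK2 hC2 hG2
    refine ⟨hK2, ?_, hG2⟩
    rw [hC2, hC]
    have htot : pvTot qr s q = pvCnt qr s q + pvTot qr (s + 1) q := by
      unfold pvTot
      rw [PySem.List.pyRange_one_cons hsq, List.map_cons, List.sum_cons]
    rw [htot]
    have hcnt : pvCnt qr s q
        = ((PySem.List.pyRange (s + 1) q 1).countP
            (fun j => PySem.Set.contains qr (j - s)) : Int) := rfl
    rw [hcnt]
    ring

lemma pvIPP_ge {q : Int} {pk : Int × Int} (h : pv_is_prime_power q = some pk) : 2 ≤ q := by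
  by_cases hq : q < 2
  · rw [pv_is_prime_power, if_pos hq] at h
    cases h
  · omega

-- any foldl whose step keeps the accumulator Nodup keeps a Nodup start Nodup
lemma pvNodupFold (g : PySem.Set Int → Int → PySem.Set Int)
    (hg : ∀ s x, s.Nodup → (g s x).Nodup) :
    ∀ (l : List Int) (s : PySem.Set Int), s.Nodup → (l.foldl g s).Nodup
  | [], _, hs => hs
  | x :: l, s, hs => pvNodupFold g hg l (g s x) (hg s x hs)

lemma pvQrNodup (p k : Int) : ((pv_qr_prime_power p k).1).Nodup := by
  have hq : ∀ m : Int, (pv_quadratic_residues m).Nodup := by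
    intro m
    exact pvNodupFold _ (fun s x hs => PySem.Set.nodup_add s _ hs) _ _ List.nodup_nil
  unfold pv_qr_prime_power
  split_ifs with h1 h2
  · exact hq _
  · exact pvNodupFold _
      (fun s x hs => by
        split_ifs
        · exact PySem.Set.nodup_add s _ hs
        · exact hs)
      _ _ List.nodup_nil
  · exact hq _

-- two strictly increasing Int lists with the same members are equal
lemma pvStrictEq {l1 l2 : List Int} (h1 : l1.Pairwise (· < ·)) (h2 : l2.Pairwise (· < ·))
    (hm : ∀ x, x ∈ l1 ↔ x ∈ l2) : l1 = l2 :=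
  PySem.List.eq_of_perm_of_pairwise_le_of_injective (fun x => x) (fun _ _ h => h)
    ((List.perm_ext_iff_of_nodup (h1.imp ne_of_lt) (h2.imp ne_of_lt)).2 hm)
    (h1.imp le_of_lt) (h2.imp le_of_lt)

-- B's lower list for v is exactly A's list of lower neighbours of v
lemma pvLowerEq (qr : PySem.Set Int) (ds : List Int) (hP : ds.Pairwise (· < ·))
    (hmem : ∀ d : Int, d ∈ ds ↔ d ∈ qr ∧ 0 < d) (v : Int) :
    pvLower ds v = pvBel qr v v := by
  apply pvStrictEq
  · unfold pvLower
    rw [List.pairwise_map]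
    exact ((List.pairwise_reverse.2 hP).filter _).imp (fun h => by omega)
  · unfold pvBel
    exact (PySem.List.pairwise_lt_pyRange_one 0 v).filter _
  · intro x
    unfold pvLower pvBel
    simp only [List.mem_map, List.mem_filter, List.mem_reverse, decide_eq_true_eq,
      PySem.List.mem_pyRange_one]
    constructor
    · rintro ⟨d, ⟨hd, hdle⟩, rfl⟩
      obtain ⟨hdqr, hdpos⟩ := (hmem d).1 hd
      have hx : v - (v - d) = d := by omega
      refine ⟨⟨by omega, by omega⟩, ?_⟩
      rw [hx]
      exact (PySem.Set.contains_iff _ _).2 hdqr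
    · rintro ⟨⟨hx0, hxv⟩, hc⟩
      exact ⟨v - x, ⟨(hmem _).2 ⟨(PySem.Set.contains_iff _ _).1 hc, by omega⟩, by omega⟩,
        by omega⟩

-- B's upper list for v is exactly A's list of upper neighbours of v
lemma pvUpperEq (qr : PySem.Set Int) (ds : List Int) (hP : ds.Pairwise (· < ·))
    (hmem : ∀ d : Int, d ∈ ds ↔ d ∈ qr ∧ 0 < d) (q v : Int) :
    pvUpper ds q v
      = (PySem.List.pyRange (v + 1) q 1).filter (fun j => PySem.Set.contains qr (j - v)) := by
  apply pvStrictEq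
  · unfold pvUpper
    rw [List.pairwise_map]
    exact (hP.filter _).imp (fun h => by omega)
  · exact (PySem.List.pairwise_lt_pyRange_one (v + 1) q).filter _
  · intro x
    unfold pvUpper
    simp only [List.mem_map, List.mem_filter, decide_eq_true_eq, PySem.List.mem_pyRange_one]
    constructor
    · rintro ⟨d, ⟨hd, hdlt⟩, rfl⟩
      obtain ⟨hdqr, hdpos⟩ := (hmem d).1 hd
      have hx : v + d - v = d := by omega
      refine ⟨⟨by omega, by omega⟩, ?_⟩
      rw [hx]
      exact (PySem.Set.contains_iff _ _).2 hdqr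
    · rintro ⟨⟨hx0, hxq⟩, hc⟩
      exact ⟨x - v, ⟨(hmem _).2 ⟨(PySem.Set.contains_iff _ _).1 hc, by omega⟩, by omega⟩,
        by omega⟩

lemma pvFullNodup (q : Int) (qr : PySem.Set Int) (v : Int) : (pvFull q qr v).Nodup := by
  unfold pvFull
  exact (PySem.List.nodup_pyRange_one 0 q).filter _

-- B's loop carries (dict, count): split it into a dict fold and a sum
lemma pvBFold (q : Int) (ds : List Int) :
    ∀ (l : List Int) (d0 : PySem.Dict Int (PySem.Set Int)) (c0 : Int),
    l.foldl
      (fun st v =>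
        (st.1.insert v (PySem.Set.ofList (pvLower ds v ++ pvUpper ds q v)),
         st.2 + ((pvUpper ds q v).length : Int)))
      (d0, c0)
      = (l.foldl (fun d v => d.insert v (PySem.Set.ofList (pvLower ds v ++ pvUpper ds q v))) d0,
         c0 + (l.map (fun v => ((pvUpper ds q v).length : Int))).sum)
  | [], d0, c0 => by simp
  | x :: l, d0, c0 => by
    simp only [List.foldl_cons, List.map_cons, List.sum_cons]
    rw [pvBFold q ds l]
    exact Prod.ext rfl (by dsimp only; ring)

-- ===== VERDICT (by name: the statement is the Claim_ definition above) =====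
theorem build_paley_graph_spec : Claim_equal_build_paley_graph := by
  intro q _hdom
  unfold Spec_build_paley_graph build_paley_graph build_paley_graph_alt
  cases hpp : pv_is_prime_power q with
  | none => rfl
  | some pk =>
    have hq2 : 2 ≤ q := pvIPP_ge hpp
    dsimp only
    set qr := (pv_qr_prime_power pk.1 pk.2).1 with hqr
    set ds := pvPosDs qr with hds
    have hRnd : (PySem.List.pyRange 0 q 1).Nodup := PySem.List.nodup_pyRange_one 0 q
    -- facts about ds = sorted positive residue distances
    have hqrnd : qr.Nodup := pvQrNodup pk.1 pk.2
    have hdsmem : ∀ d : Int, d ∈ ds ↔ d ∈ qr ∧ 0 < d := by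
      intro d
      rw [hds]
      unfold pvPosDs
      rw [PySem.List.mem_sorted, List.mem_filter]
      simp
    have hdsnd : ds.Nodup := by
      rw [hds]
      unfold pvPosDs
      exact (PySem.List.sorted_perm _ _ _).nodup_iff.2 (hqrnd.filter _)
    have hdsP : ds.Pairwise (· < ·) := by
      have hle : ds.Pairwise (· ≤ ·) := by
        rw [hds]
        unfold pvPosDs
        exact PySem.List.sorted_pairwise _ _
      exact (hle.and hdsnd).imp (fun h => lt_of_le_of_ne h.1 h.2)
    -- the per-vertex neighbour set B builds is A's
    have hvert : ∀ v : Int, 0 ≤ v → v < q →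
        PySem.Set.ofList (pvLower ds v ++ pvUpper ds q v) = pvFull q qr v := by
      intro v h0 h1
      rw [pvLowerEq qr ds hdsP hdsmem v, pvUpperEq qr ds hdsP hdsmem q v,
          ← pvFull_eq q qr v h0 h1]
      exact PySem.Set.ofList_eq_self_of_nodup _ (pvFullNodup q qr v)
    -- A's side: outer-loop characterisation from the freshly initialised dict
    set adj0 := (PySem.List.pyRange 0 q 1).foldl
        (fun d i => d.insert i PySem.Set.empty) PySem.Dict.empty with hadj0
    have hkeys0 : adj0.keys = PySem.List.pyRange 0 q 1 := by
      have h := PySem.Dict.keys_foldl_insert (PySem.List.pyRange 0 q 1)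
        (fun _ _ => PySem.Set.empty) (PySem.Dict.empty (κ := Int) (ν := PySem.Set Int))
      rw [PySem.Dict.keys_empty, PySem.Set.update_nil_left,
          PySem.Set.ofList_eq_self_of_nodup _ hRnd] at h
      exact h
    have hitems0 : adj0.items
        = (PySem.List.pyRange 0 q 1).map (fun i => (i, PySem.Set.empty)) := by
      have h := PySem.Dict.items_foldl_insert_fresh (PySem.List.pyRange 0 q 1)
        (fun i => i) (fun _ => PySem.Set.empty)
        (PySem.Dict.empty (κ := Int) (ν := PySem.Set Int))
        (fun a _ => by simp) (by simpa using hRnd)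
      simpa using h
    have hinv0 : ∀ v : Int, adj0.getD v PySem.Set.empty =
        if 0 ≤ v ∧ v < q then (if v < 0 then pvFull q qr v else pvBel qr 0 v)
        else PySem.Set.empty := by
      intro v
      by_cases h0 : 0 ≤ v ∧ v < q
      · have hv : (v, PySem.Set.empty) ∈ adj0.items := by
          rw [hitems0]
          exact List.mem_map.2 ⟨v, PySem.List.mem_pyRange_one.2 h0, rfl⟩
        rw [PySem.Dict.getD_of_mem_items adj0 hv (hkeys0 ▸ hRnd) PySem.Set.empty,
            if_pos h0, if_neg (by omega : ¬ v < (0 : Int))]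
        show PySem.Set.empty = pvBel qr 0 v
        unfold pvBel
        rw [PySem.List.pyRange_one_eq_nil (le_refl (0 : Int))]
        rfl
      · have hcf : adj0.contains v = false := by
          cases hb : adj0.contains v with
          | false => rfl
          | true =>
            have hm : v ∈ adj0.keys := (PySem.Dict.contains_iff_mem_keys adj0 v).1 hb
            rw [hkeys0] at hm
            exact absurd (PySem.List.mem_pyRange_one.1 hm) h0
        rw [PySem.Dict.getD_of_not_contains adj0 PySem.Set.empty hcf, if_neg h0]
    obtain ⟨hK, hC, hG⟩ := pvOuter q qr 0 adj0 0 (le_refl 0) hkeys0 hinv0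
    -- B's side: split the pair fold
    rw [pvBFold q ds (PySem.List.pyRange 0 q 1) PySem.Dict.empty 0]
    have hBitems : ((PySem.List.pyRange 0 q 1).foldl
          (fun d v => d.insert v (PySem.Set.ofList (pvLower ds v ++ pvUpper ds q v)))
          PySem.Dict.empty).items
        = (PySem.List.pyRange 0 q 1).map
            (fun v => (v, PySem.Set.ofList (pvLower ds v ++ pvUpper ds q v))) := by
      have h := PySem.Dict.items_foldl_insert_fresh (PySem.List.pyRange 0 q 1)
        (fun v => v) (fun v => PySem.Set.ofList (pvLower ds v ++ pvUpper ds q v))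
        (PySem.Dict.empty (κ := Int) (ν := PySem.Set Int))
        (fun a _ => by simp) (by simpa using hRnd)
      simpa using h
    -- the two items lists agree
    have h1 : ((PySem.List.pyRange 0 q 1).foldl
          (fun st i => (PySem.List.pyRange (i + 1) q 1).foldl (pvStepA q qr i) st)
          (adj0, (0 : Int))).1.items
        = (PySem.List.pyRange 0 q 1).map
            (fun v => (v, PySem.Set.ofList (pvLower ds v ++ pvUpper ds q v))) := by
      rw [PySem.Dict.items_eq_map_keys _ (by rw [hK]; exact hRnd) PySem.Set.empty, hK]
      apply List.map_congr_left
      intro v hv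
      have hb := PySem.List.mem_pyRange_one.1 hv
      rw [hG v, if_pos hb, hvert v hb.1 hb.2]
    -- the two edge counts agree
    have h2 : ((PySem.List.pyRange 0 q 1).foldl
          (fun st i => (PySem.List.pyRange (i + 1) q 1).foldl (pvStepA q qr i) st)
          (adj0, (0 : Int))).2
        = 0 + ((PySem.List.pyRange 0 q 1).map
            (fun v => ((pvUpper ds q v).length : Int))).sum := by
      rw [hC]
      congr 1
      unfold pvTot
      apply congrArg
      apply List.map_congr_left
      intro v hv
      have hb := PySem.List.mem_pyRange_one.1 hv
      unfold pvCnt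
      rw [List.countP_eq_length_filter, pvUpperEq qr ds hdsP hdsmem q v]
    rw [h1, h2, hBitems]
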